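/-
  THE GRAMMAR IS DECIDABLE: `Bool` checkers for the predicates of Json/Grammar.lean, each with its specification.
    isNumber_iff        isNumber t = true ↔ IsNumber t           (RFC 8259 §6)
    isStringBody_iff    isStringBody b = true ↔ IsStringBody b   (§7; the checker is defined in Grammar.lean)
    Layout.wellFormedB_iff   l.wellFormedB = true ↔ l.WellFormed
  and the `Decidable` instances, so that `by decide` settles closed examples.
-/
import Json.Grammar

namespace Json

/-! ### Numbers -/

/-- Drop the leading digits. -/
def dropDigits : List UInt8 → List UInt8
  | [] => []
  | c :: r => if isDigit c then dropDigits r else c :: r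

/-- `1*DIGIT` and nothing else. -/
def allDigits1 (r : List UInt8) : Bool := !r.isEmpty && r.all isDigit

/-- Nothing, or `exp`. -/
def expPart : List UInt8 → Bool
  | [] => true
  | e :: r =>
    (e.toNat == 0x65 || e.toNat == 0x45) &&
      match r with
      | [] => false
      | s :: r' => if s.toNat == 0x2b || s.toNat == 0x2d then allDigits1 r' else allDigits1 (s :: r')

/-- `[ frac ] [ exp ]`. -/
def fracExp : List UInt8 → Bool
  | [] => true
  | c :: r =>
    if c.toNat == 0x2e then
      match r with
      | [] => false
      | d :: r' => isDigit d && expPart (dropDigits r')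
    else expPart (c :: r)

/-- `int [ frac ] [ exp ]`. -/
def intFracExp : List UInt8 → Bool
  | [] => false
  | c :: r => if c.toNat == 0x30 then fracExp r else isDigit19 c && fracExp (dropDigits r)

/-- **The checker of `IsNumber`.** -/
def isNumber : List UInt8 → Bool
  | [] => false
  | c :: r => if c.toNat == 0x2d then intFracExp r else intFracExp (c :: r)

theorem byte_eq_of_toNat {c : UInt8} {k : Nat} (hk : k < 256) (h : c.toNat = k) : c = UInt8.ofNat k := by
  apply UInt8.toNat_inj.mp; rw [h]; simp [Nat.mod_eq_of_lt hk]

/-- A text splits into its leading digits and the rest. -/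
theorem dropDigits_split : ∀ t : List UInt8, ∃ d, t = d ++ dropDigits t ∧ ∀ x ∈ d, isDigit x = true
  | [] => ⟨[], rfl, fun _ h => by simp at h⟩
  | c :: r => by
    by_cases hc : isDigit c = true
    · obtain ⟨d, h1, h2⟩ := dropDigits_split r
      refine ⟨c :: d, ?_, ?_⟩
      · simp only [dropDigits, hc, if_true, List.cons_append]; rw [← h1]
      · intro x hx; rcases List.mem_cons.mp hx with rfl | hx
        · exact hc
        · exact h2 x hx
    · exact ⟨[], by simp [dropDigits, hc], fun _ h => by simp at h⟩

/-- Digits followed by something that does not start with a digit: dropping the digits leaves that. -/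
theorem dropDigits_append : ∀ (d rest : List UInt8), (∀ x ∈ d, isDigit x = true) → (∀ c r, rest = c :: r → isDigit c = false) →
    dropDigits (d ++ rest) = rest
  | [], rest, _, hr => by
    cases rest with
    | nil => rfl
    | cons c r => simp [dropDigits, hr c r rfl]
  | x :: d, rest, hd, hr => by
    simp only [List.cons_append, dropDigits, hd x (by simp), if_true]
    exact dropDigits_append d rest (fun y hy => hd y (by simp [hy])) hr

theorem allDigits1_iff (r : List UInt8) : allDigits1 r = true ↔ IsDigits r := by
  cases r <;> simp [allDigits1, IsDigits]

theorem expPart_sound : ∀ r, expPart r = true → r = [] ∨ IsExp r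
  | [], _ => Or.inl rfl
  | e :: r, h => by
    right
    simp only [expPart, Bool.and_eq_true, Bool.or_eq_true, beq_iff_eq] at h
    obtain ⟨he, hr⟩ := h
    have he' : e = 0x65 ∨ e = 0x45 := by
      rcases he with h | h
      · exact Or.inl (byte_eq_of_toNat (by decide) h)
      · exact Or.inr (byte_eq_of_toNat (by decide) h)
    cases r with
    | nil => simp at hr
    | cons s r' =>
      by_cases hs : s.toNat = 0x2b ∨ s.toNat = 0x2d
      · have hr' : allDigits1 r' = true := by simpa [hs] using hr
        rcases hs with hs | hs
        · exact ⟨e, [0x2b], r', by rw [byte_eq_of_toNat (by decide) hs]; rfl, he', Or.inr (Or.inl rfl), (allDigits1_iff _).mp hr'⟩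
        · exact ⟨e, [0x2d], r', by rw [byte_eq_of_toNat (by decide) hs]; rfl, he', Or.inr (Or.inr rfl), (allDigits1_iff _).mp hr'⟩
      · have hr' : allDigits1 (s :: r') = true := by simpa [hs] using hr
        exact ⟨e, [], s :: r', rfl, he', Or.inl rfl, (allDigits1_iff _).mp hr'⟩

theorem expPart_complete {r : List UInt8} (h : r = [] ∨ IsExp r) : expPart r = true := by
  rcases h with rfl | ⟨e, sign, d, rfl, he, hs, hd⟩
  · rfl
  · have he' : (e.toNat == 0x65 || e.toNat == 0x45) = true := by rcases he with rfl | rfl <;> decide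
    obtain ⟨d0, d', rfl⟩ : ∃ d0 d', d = d0 :: d' := by
      cases d with
      | nil => exact absurd rfl hd.1
      | cons a b => exact ⟨a, b, rfl⟩
    rcases hs with rfl | rfl | rfl
    · have hd0 : isDigit d0 = true := hd.2 d0 (by simp)
      have : (d0.toNat == 0x2b || d0.toNat == 0x2d) = false := by simp [isDigit] at hd0 ⊢; omega
      simp only [List.cons_append, List.nil_append, expPart, he', this, Bool.false_eq_true, if_false, Bool.true_and]
      exact (allDigits1_iff _).mpr hd
    · simp only [expPart, he', Bool.true_and, List.cons_append, List.nil_append]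
      exact (allDigits1_iff _).mpr hd
    · simp only [expPart, he', Bool.true_and, List.cons_append, List.nil_append]
      exact (allDigits1_iff _).mpr hd

/-- An `exp` (or nothing) does not start with a digit. -/
theorem exp_head_not_digit {exp : List UInt8} (h : exp = [] ∨ IsExp exp) : ∀ c r, exp = c :: r → isDigit c = false := by
  intro c r hc
  rcases h with rfl | ⟨e, sign, d, rfl, he, _⟩
  · simp at hc
  · simp only [List.cons_append, List.cons.injEq] at hc
    obtain ⟨rfl, _⟩ := hc
    rcases he with rfl | rfl <;> decide

theorem fracExp_sound : ∀ r, fracExp r = true → ∃ frac exp, r = frac ++ exp ∧ (frac = [] ∨ IsFrac frac) ∧ (exp = [] ∨ IsExp exp)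
  | [], _ => ⟨[], [], rfl, Or.inl rfl, Or.inl rfl⟩
  | c :: r, h => by
    simp only [fracExp] at h
    split at h
    · rename_i hc
      simp only [beq_iff_eq] at hc
      cases r with
      | nil => simp at h
      | cons d r' =>
        simp only [Bool.and_eq_true] at h
        obtain ⟨ds, h1, h2⟩ := dropDigits_split r'
        refine ⟨c :: d :: ds, dropDigits r', by rw [List.cons_append, List.cons_append, ← h1], Or.inr ⟨d :: ds, ?_, by simp, ?_⟩,
          expPart_sound _ h.2⟩
        · rw [byte_eq_of_toNat (by decide) hc]; rfl
        · intro x hx; rcases List.mem_cons.mp hx with rfl | hx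
          · exact h.1
          · exact h2 x hx
    · exact ⟨[], c :: r, rfl, Or.inl rfl, expPart_sound _ h⟩

theorem fracExp_complete {frac exp : List UInt8} (hf : frac = [] ∨ IsFrac frac) (he : exp = [] ∨ IsExp exp) : fracExp (frac ++ exp) = true := by
  rcases hf with rfl | ⟨d, rfl, hd⟩
  · cases exp with
    | nil => rfl
    | cons c r =>
      have hc : (c.toNat == 0x2e) = false := by
        rcases he with h | ⟨e, sign, d, h, he, _⟩
        · simp at h
        · simp only [List.cons_append, List.cons.injEq] at h
          obtain ⟨rfl, _⟩ := h
          rcases he with rfl | rfl <;> decide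
      simp only [List.nil_append, fracExp, hc, Bool.false_eq_true, if_false]
      exact expPart_complete he
  · obtain ⟨d0, d', rfl⟩ : ∃ d0 d', d = d0 :: d' := by
      cases d with
      | nil => exact absurd rfl hd.1
      | cons a b => exact ⟨a, b, rfl⟩
    have h2e : ((0x2e : UInt8).toNat == 0x2e) = true := by decide
    simp only [List.cons_append, fracExp, h2e, if_true, hd.2 d0 (by simp), Bool.true_and]
    rw [dropDigits_append d' exp (fun x hx => hd.2 x (by simp [hx])) (exp_head_not_digit he)]
    exact expPart_complete he

/-- What follows the `int`: nothing, a `frac`, or an `exp` — never a digit. -/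
theorem fracExp_head_not_digit {frac exp : List UInt8} (hf : frac = [] ∨ IsFrac frac) (he : exp = [] ∨ IsExp exp) :
    ∀ c r, frac ++ exp = c :: r → isDigit c = false := by
  intro c r h
  rcases hf with rfl | ⟨d, rfl, _⟩
  · exact exp_head_not_digit he c r (by simpa using h)
  · simp only [List.cons_append, List.cons.injEq] at h
    obtain ⟨rfl, _⟩ := h; decide

theorem intFracExp_sound : ∀ t, intFracExp t = true →
    ∃ int frac exp, t = int ++ frac ++ exp ∧ IsInt int ∧ (frac = [] ∨ IsFrac frac) ∧ (exp = [] ∨ IsExp exp)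
  | [], h => by simp [intFracExp] at h
  | c :: r, h => by
    simp only [intFracExp] at h
    split at h
    · rename_i hc
      simp only [beq_iff_eq] at hc
      obtain ⟨frac, exp, rfl, hf, he⟩ := fracExp_sound r h
      exact ⟨[0x30], frac, exp, by rw [byte_eq_of_toNat (by decide) hc]; rfl, Or.inl rfl, hf, he⟩
    · simp only [Bool.and_eq_true] at h
      obtain ⟨ds, h1, h2⟩ := dropDigits_split r
      obtain ⟨frac, exp, h3, hf, he⟩ := fracExp_sound _ h.2
      exact ⟨c :: ds, frac, exp, by rw [List.cons_append, List.cons_append, List.append_assoc, ← h3, ← h1], Or.inr ⟨c, ds, rfl, h.1, h2⟩, hf, he⟩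

theorem intFracExp_complete {int frac exp : List UInt8} (hi : IsInt int) (hf : frac = [] ∨ IsFrac frac) (he : exp = [] ∨ IsExp exp) :
    intFracExp (int ++ frac ++ exp) = true := by
  rcases hi with rfl | ⟨c, d, rfl, hc, hd⟩
  · have : ((0x30 : UInt8).toNat == 0x30) = true := by decide
    simp only [List.cons_append, List.nil_append, intFracExp, this, if_true]
    exact fracExp_complete hf he
  · have : (c.toNat == 0x30) = false := by simp [isDigit19] at hc ⊢; omega
    simp only [List.cons_append, List.append_assoc, intFracExp, this, Bool.false_eq_true, if_false, hc, Bool.true_and]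
    rw [dropDigits_append d (frac ++ exp) hd (fracExp_head_not_digit hf he)]
    exact fracExp_complete hf he

/-- **`isNumber` decides `IsNumber`.** -/
theorem isNumber_iff (t : List UInt8) : isNumber t = true ↔ IsNumber t := by
  constructor
  · intro h
    cases t with
    | nil => simp [isNumber] at h
    | cons c r =>
      simp only [isNumber] at h
      split at h
      · rename_i hc
        simp only [beq_iff_eq] at hc
        obtain ⟨int, frac, exp, rfl, hi, hf, he⟩ := intFracExp_sound r h
        exact ⟨[0x2d], int, frac, exp, by rw [byte_eq_of_toNat (by decide) hc]; rfl, Or.inr rfl, hi, hf, he⟩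
      · obtain ⟨int, frac, exp, h1, hi, hf, he⟩ := intFracExp_sound _ h
        exact ⟨[], int, frac, exp, by simpa using h1, Or.inl rfl, hi, hf, he⟩
  · rintro ⟨minus, int, frac, exp, rfl, hm, hi, hf, he⟩
    rcases hm with rfl | rfl
    · obtain ⟨i0, int', rfl, hi0⟩ : ∃ i0 int', int = i0 :: int' ∧ isDigit i0 = true := by
        rcases hi with rfl | ⟨c, d, rfl, hc, _⟩
        · exact ⟨_, _, rfl, by decide⟩
        · exact ⟨_, _, rfl, by simp [isDigit, isDigit19] at *; omega⟩
      have : (i0.toNat == 0x2d) = false := by simp [isDigit] at hi0 ⊢; omega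
      have h := intFracExp_complete hi hf he
      simp only [List.nil_append, List.cons_append, List.append_assoc] at h ⊢
      simp only [isNumber, this, Bool.false_eq_true, if_false]
      exact h
    · have : ((0x2d : UInt8).toNat == 0x2d) = true := by decide
      have h := intFracExp_complete hi hf he
      simp only [List.cons_append, List.nil_append, List.append_assoc] at h ⊢
      simp only [isNumber, this, if_true]
      exact h

instance (t : List UInt8) : Decidable (IsNumber t) := decidable_of_iff _ (isNumber_iff t)

/-! ### String bodies -/

theorem isStringBody_sound : ∀ (n : Nat) (b : List UInt8), b.length ≤ n → isStringBody b = true → IsStringBody b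
  | _, [], _, _ => .nil
  | 0, _ :: _, hn, _ => by simp at hn
  | n + 1, c :: rest, hn, h => by
    rw [isStringBody.eq_def] at h
    simp only at h
    split at h
    · rename_i hc
      simp only [beq_iff_eq] at hc
      rw [byte_eq_of_toNat (by decide) hc]
      cases rest with
      | nil => simp at h
      | cons e rest' =>
        simp only at h
        split at h
        · rename_i he
          exact .escape e rest' he (isStringBody_sound n rest' (by simp at hn ⊢; omega) h)
        · split at h
          · rename_i hu
            simp only [beq_iff_eq] at hu
            rw [byte_eq_of_toNat (by decide) hu]
            match rest', h with
            | h1 :: h2 :: h3 :: h4 :: rest'', h =>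
              simp only [Bool.and_eq_true] at h
              exact .unicode h1 h2 h3 h4 rest'' h.1.1.1.1 h.1.1.1.2 h.1.1.2 h.1.2 (isStringBody_sound n rest'' (by simp at hn ⊢; omega) h.2)
            | [], h | [_], h | [_, _], h | [_, _, _], h => simp at h
          · simp at h
    · simp only [Bool.and_eq_true] at h
      exact .unescaped c rest h.1 (isStringBody_sound n rest (by simp at hn ⊢; omega) h.2)

/-- **`isStringBody` decides `IsStringBody`.** -/
theorem isStringBody_iff (b : List UInt8) : isStringBody b = true ↔ IsStringBody b := by
  constructor
  · exact isStringBody_sound b.length b (Nat.le_refl _)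
  · intro h
    induction h with
    | nil => rfl
    | unescaped c rest hc _ ih =>
      have : (c.toNat == 0x5c) = false := by simp [isUnescaped] at hc ⊢; omega
      rw [isStringBody.eq_def]
      simp only [this, Bool.false_eq_true, if_false, hc, ih, Bool.and_self]
    | escape e rest he _ ih =>
      have : ((0x5c : UInt8).toNat == 0x5c) = true := by decide
      rw [isStringBody.eq_def]
      simp only [this, if_true, he, ih]
    | unicode h1 h2 h3 h4 rest e1 e2 e3 e4 _ ih =>
      have a : ((0x5c : UInt8).toNat == 0x5c) = true := by decide
      have b : isEscapeChar 0x75 = false := by decide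
      have c : ((0x75 : UInt8).toNat == 0x75) = true := by decide
      rw [isStringBody.eq_def]
      simp only [a, b, c, if_true, Bool.false_eq_true, if_false, e1, e2, e3, e4, ih, Bool.and_self]

instance (b : List UInt8) : Decidable (IsStringBody b) := decidable_of_iff _ (isStringBody_iff b)

/-! ### Layouts -/

mutual
/-- The checker of `Layout.WellFormed`. -/
def Layout.wellFormedB : Layout → Bool
  | .number t => isNumber t
  | .string b => isStringBody b
  | .array ws items => isWs ws && items.wellFormedB
  | .object ws members => isWs ws && members.wellFormedB
  | _ => true
def Items.wellFormedB : Items → Bool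
  | .nil => true
  | .cons pre item post rest => isWs pre && item.wellFormedB && isWs post && rest.wellFormedB
def Members.wellFormedB : Members → Bool
  | .nil => true
  | .cons pre key mid pre' val post rest =>
    isWs pre && isStringBody key && isWs mid && isWs pre' && val.wellFormedB && isWs post && rest.wellFormedB
end

mutual
theorem Layout.wellFormedB_iff : (l : Layout) → (l.wellFormedB = true ↔ l.WellFormed)
  | .null | .true | .false => by simp [Layout.wellFormedB, Layout.WellFormed]
  | .number t => by simp [Layout.wellFormedB, Layout.WellFormed, isNumber_iff]
  | .string b => by simp [Layout.wellFormedB, Layout.WellFormed, isStringBody_iff]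
  | .array ws items => by simp [Layout.wellFormedB, Layout.WellFormed, isWs_iff, Items.wellFormedB_iff items]
  | .object ws members => by simp [Layout.wellFormedB, Layout.WellFormed, isWs_iff, Members.wellFormedB_iff members]
theorem Items.wellFormedB_iff : (is : Items) → (is.wellFormedB = true ↔ is.WellFormed)
  | .nil => by simp [Items.wellFormedB, Items.WellFormed]
  | .cons pre item post rest => by
    simp [Items.wellFormedB, Items.WellFormed, isWs_iff, Layout.wellFormedB_iff item, Items.wellFormedB_iff rest, and_assoc]
theorem Members.wellFormedB_iff : (ms : Members) → (ms.wellFormedB = true ↔ ms.WellFormed)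
  | .nil => by simp [Members.wellFormedB, Members.WellFormed]
  | .cons pre key mid pre' val post rest => by
    simp [Members.wellFormedB, Members.WellFormed, isWs_iff, isStringBody_iff, Layout.wellFormedB_iff val, Members.wellFormedB_iff rest,
      and_assoc]
end

instance (l : Layout) : Decidable l.WellFormed := decidable_of_iff _ (Layout.wellFormedB_iff l)

/-! ### Small checks of the grammar itself -/

example : IsNumber [0x30] := by decide                                                  -- 0
example : IsNumber [0x2d, 0x30] := by decide                                            -- -0
example : IsNumber [0x2d, 0x31, 0x2e, 0x35, 0x45, 0x2d, 0x31, 0x30] := by decide        -- -1.5E-10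
example : IsNumber [0x31, 0x65, 0x2b, 0x35] := by decide                                -- 1e+5
example : ¬ IsNumber [] := by decide
example : ¬ IsNumber [0x2d] := by decide                                                -- -
example : ¬ IsNumber [0x30, 0x31] := by decide                                          -- 01   (leading zero)
example : ¬ IsNumber [0x31, 0x2e] := by decide                                          -- 1.
example : ¬ IsNumber [0x2e, 0x35] := by decide                                          -- .5
example : ¬ IsNumber [0x2b, 0x31] := by decide                                          -- +1
example : ¬ IsNumber [0x31, 0x65] := by decide                                          -- 1e
example : ¬ IsNumber [0x30, 0x78, 0x31, 0x46] := by decide                              -- 0x1F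
example : IsStringBody [0x61, 0x5c, 0x22, 0x62, 0x5c, 0x75, 0x30, 0x30, 0x65, 0x39] := by decide   -- a\"b\u00e9
example : IsStringBody [0xc3, 0xa9, 0x7f] := by decide                                  -- UTF-8 bytes, DEL: allowed by §7
example : ¬ IsStringBody [0x5c, 0x78] := by decide                                      -- \x
example : ¬ IsStringBody [0x61, 0x09] := by decide                                      -- a TAB (control characters must be escaped)
example : ¬ IsStringBody [0x5c, 0x75, 0x31, 0x32, 0x47, 0x34] := by decide              -- \u12G4
example : ¬ IsStringBody [0x5c, 0x75, 0x31, 0x32] := by decide                          -- \u12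
example : ¬ IsStringBody [0x61, 0x22] := by decide                                      -- a"
example : ¬ IsStringBody [0x5c] := by decide                                            -- a lone backslash

end Json
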